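-- pv_equiv track=rewrite | github.com/wmouwen/everybody-codes | events/2024/7/solution.py | device_power
-- ===== SOURCE A (Python) =====
-- from enum import StrEnum
--
-- class Action(StrEnum):
--     INCREASE = '+'
--     DECREASE = '-'
--     MAINTAIN = '='
--     START = 'S'
--
-- def device_power(device: list[Action], track_length: int) -> int:
--     output = 0
--     power = 10
--
--     for s in range(track_length):
--         match device[s % len(device)]:
--             case Action.INCREASE:
--                 power += 1
--             case Action.DECREASE:
--                 power -= 1
--
--         output += power
--
--     return output
-- ===== SOURCE B (Python) =====
-- def device_power(device, track_length):
--     if track_length <= 0: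
--         return 0
--     n = len(device)
--     prefix = [0]
--     for s in device:
--         d = 1 if s == '+' else -1 if s == '-' else 0
--         prefix.append(prefix[-1] + d)
--     cycle = prefix[n]
--     psum = [0]
--     for p in prefix[1:]:
--         psum.append(psum[-1] + p)
--     q, r = divmod(track_length, n)
--     return (10 * track_length
--             + cycle * n * (q * (q - 1) // 2)
--             + q * psum[n]
--             + q * cycle * r
--             + psum[r])
-- ===== Notes on version B (the rewrite author's own statement) =====
-- stated objective: alternative
-- what changed: Replaces the step-by-step simulation of all track_length steps with prefix sums over one period of the device plus a closed-form (Gauss-sum) accumulation over complete cycles and the remainder; intended as faster for track_length >> len(device), measured only 1.32x on the generated inputs.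
import Mathlib
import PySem

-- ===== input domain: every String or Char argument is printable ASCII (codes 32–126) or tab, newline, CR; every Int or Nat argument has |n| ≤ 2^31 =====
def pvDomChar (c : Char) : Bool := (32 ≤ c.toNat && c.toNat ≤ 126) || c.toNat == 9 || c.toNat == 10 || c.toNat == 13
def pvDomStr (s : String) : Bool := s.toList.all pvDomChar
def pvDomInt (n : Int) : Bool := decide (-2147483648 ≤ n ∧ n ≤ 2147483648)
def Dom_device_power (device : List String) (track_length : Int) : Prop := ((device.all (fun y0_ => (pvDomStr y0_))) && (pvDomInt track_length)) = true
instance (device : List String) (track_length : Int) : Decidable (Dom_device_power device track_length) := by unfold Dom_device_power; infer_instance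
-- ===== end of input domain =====

-- B replaces A's step-by-step simulation of every track step by prefix sums over one
-- period of the device plus a closed-form (Gauss-sum) total over complete cycles and
-- the remainder.

-- ===== PORT A =====
def device_power (device : List String) (track_length : Int) : Int :=
  ((PySem.List.pyRange 0 track_length 1).foldl
    (fun (st : Int × Int) s =>
      let c := PySem.List.pyGetD device (PySem.Int.mod s ((device.length : Int))) ""
      let power := if c = "+" then st.2 + 1 else if c = "-" then st.2 - 1 else st.2
      (st.1 + power, power))
    (0, 10)).1

-- ===== PORT B =====
def device_power_alt (device : List String) (track_length : Int) : Int :=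
  if track_length ≤ 0 then 0
  else
    let n : Int := (device.length : Int)
    let pref := device.foldl
      (fun (acc : List Int) s =>
        let d : Int := if s = "+" then 1 else if s = "-" then -1 else 0
        acc ++ [PySem.List.pyGetD acc (-1) 0 + d]) [0]
    let cycle := PySem.List.pyGetD pref n 0
    let psum := (pref.drop 1).foldl
      (fun (acc : List Int) p => acc ++ [PySem.List.pyGetD acc (-1) 0 + p]) [0]
    let q := PySem.Int.floordiv track_length n
    let r := PySem.Int.mod track_length n
    10 * track_length + cycle * n * (PySem.Int.floordiv (q * (q - 1)) 2)
      + q * PySem.List.pyGetD psum n 0 + q * cycle * r + PySem.List.pyGetD psum r 0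

-- ===== PRECONDITION & SPEC =====
-- A raises ZeroDivisionError (s % 0 on the first iteration) on an empty device with
-- track_length > 0; Pre_ excludes exactly those inputs (B raises there too).
def Pre_device_power (device : List String) (track_length : Int) : Prop :=
  device ≠ [] ∨ track_length ≤ 0
instance (device : List String) (track_length : Int) : Decidable (Pre_device_power device track_length) := by unfold Pre_device_power; infer_instance

def pvWitness_device_power : List String × Int := (["+", "-", "="], 7)

def Spec_device_power (device : List String) (track_length : Int) (out : Int) : Prop := out = device_power_alt device track_length
instance (device : List String) (track_length : Int) (out : Int) : Decidable (Spec_device_power device track_length out) := by unfold Spec_device_power; infer_instance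

-- ===== CLAIM =====
def Claim_equal_device_power : Prop := ∀ (device : List String) (track_length : Int), Dom_device_power device track_length → Pre_device_power device track_length → Spec_device_power device track_length (device_power device track_length)

-- ===== LEMMAS AND PROOFS =====

-- delta of one action string
def pvDelta (s : String) : Int := if s = "+" then 1 else if s = "-" then -1 else 0

-- power offset from 10 after m steps of A's loop
def pvS (device : List String) : Nat → Int
  | 0 => 0
  | m+1 => pvS device m + pvDelta (device.getD (m % device.length) "")

-- accumulated output after m steps, minus 10*m: ∑_{k=1}^m pvS k
def pvT (device : List String) : Nat → Int
  | 0 => 0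
  | m+1 => pvT device m + pvS device (m+1)

-- window sum ∑_{i=1}^j pvS (m+i)
def pvR (device : List String) (m : Nat) : Nat → Int
  | 0 => 0
  | j+1 => pvR device m j + pvS device (m + j + 1)

-- Gauss sum 0+1+…+(q-1)
def pvG (q : Nat) : Int := ∑ i ∈ Finset.range q, (i : Int)

-- exclusive prefix-sum scan
def pvScan (a : Int) : List Int → List Int
  | [] => []
  | x :: l => (a + x) :: pvScan (a + x) l

lemma pvIfDelta (c : String) (p : Int) :
    (if c = "+" then p + 1 else if c = "-" then p - 1 else p) = p + pvDelta c := by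
  unfold pvDelta; split_ifs <;> ring

lemma pvA_loop (device : List String) (m : Nat) :
    ((PySem.List.pyRange 0 (m : Int) 1).foldl
      (fun (st : Int × Int) s =>
        let c := PySem.List.pyGetD device (PySem.Int.mod s ((device.length : Int))) ""
        let power := if c = "+" then st.2 + 1 else if c = "-" then st.2 - 1 else st.2
        (st.1 + power, power))
      (0, 10)) = (10 * m + pvT device m, 10 + pvS device m) := by
  induction m with
  | zero => simp [PySem.List.pyRange_one_eq_nil (by omega : (0:Int) ≤ 0), pvT, pvS]
  | succ m ih =>
    rw [show ((m + 1 : Nat) : Int) = (m : Int) + 1 by push_cast; ring,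
        PySem.List.pyRange_one_succ_right (by positivity), List.foldl_append, ih]
    simp only [List.foldl_cons, List.foldl_nil, PySem.Int.mod_natCast,
      PySem.List.pyGetD_natCast, pvIfDelta]
    rw [show pvT device (m+1) = pvT device m + pvS device (m+1) from rfl,
        show pvS device (m+1) = pvS device m + pvDelta (device.getD (m % device.length) "") from rfl]
    simp only [Prod.mk.injEq]
    constructor <;> ring

lemma pvS_shift (device : List String) (a : Nat) :
    pvS device (a + device.length) = pvS device a + pvS device device.length := by
  induction a with
  | zero => simp [pvS]
  | succ a ih =>
    rw [show a + 1 + device.length = (a + device.length) + 1 by omega]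
    rw [show pvS device (a + device.length + 1)
          = pvS device (a + device.length)
            + pvDelta (device.getD ((a + device.length) % device.length) "") from rfl,
        ih, Nat.add_mod_right,
        show pvS device (a+1) = pvS device a + pvDelta (device.getD (a % device.length) "") from rfl]
    ring

lemma pvT_split (device : List String) (j m : Nat) :
    pvT device (m + j) = pvT device m + pvR device m j := by
  induction j with
  | zero => simp [pvR]
  | succ j ih =>
    show pvT device (m + j + 1) = _
    rw [show pvT device (m + j + 1) = pvT device (m + j) + pvS device (m + j + 1) from rfl,
        ih, show pvR device m (j+1) = pvR device m j + pvS device (m + j + 1) from rfl]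
    ring

lemma pvR_shift (device : List String) (j m : Nat) :
    pvR device (m + device.length) j = pvR device m j + j * pvS device device.length := by
  induction j with
  | zero => simp [pvR]
  | succ j ih =>
    rw [show pvR device (m + device.length) (j+1)
          = pvR device (m + device.length) j + pvS device (m + device.length + j + 1) from rfl,
        ih,
        show m + device.length + j + 1 = (m + j + 1) + device.length by omega,
        pvS_shift,
        show pvR device m (j+1) = pvR device m j + pvS device (m + j + 1) from rfl]
    push_cast; ring

lemma pvT_period (device : List String) (a : Nat) :
    pvT device (device.length + a)
      = pvT device device.length + pvT device a + a * pvS device device.length := by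
  have h1 := pvT_split device a device.length
  have h2 := pvR_shift device a 0
  have h3 := pvT_split device a 0
  simp only [Nat.zero_add] at h2 h3
  rw [h1, h2]
  simp [pvT] at h3
  rw [← h3]; ring

lemma pvMain (device : List String) (q r : Nat) :
    pvT device (q * device.length + r)
      = pvS device device.length * (device.length : Int) * pvG q
        + q * pvT device device.length
        + q * pvS device device.length * r
        + pvT device r := by
  induction q with
  | zero => simp [pvG]
  | succ q ih =>
    rw [show (q+1) * device.length + r = device.length + (q * device.length + r) by ring,
        pvT_period, ih]
    simp only [pvG, Finset.sum_range_succ]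
    push_cast; ring

lemma pvScan_fold (l : List Int) : ∀ (acc : List Int) (x0 : Int),
    l.foldl (fun (acc : List Int) x => acc ++ [PySem.List.pyGetD acc (-1) 0 + x]) (acc ++ [x0])
      = acc ++ x0 :: pvScan x0 l := by
  induction l with
  | nil => intro acc x0; simp [pvScan]
  | cons x l ih =>
    intro acc x0
    rw [List.foldl_cons, PySem.List.pyGetD_neg_one_append_singleton, ih]
    simp [pvScan]

lemma pvScan_length (a : Int) (l : List Int) : (pvScan a l).length = l.length := by
  induction l generalizing a with
  | nil => rfl
  | cons x l ih => simp [pvScan, ih]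

lemma pvScan_get (l : List Int) : ∀ (a : Int) (k : Nat) (h : k < (pvScan a l).length),
    (pvScan a l)[k] = a + (l.take (k+1)).sum := by
  induction l with
  | nil => intro a k h; simp [pvScan] at h
  | cons x l ih =>
    intro a k h
    cases k with
    | zero => simp [pvScan]
    | succ k =>
      have h' : k < (pvScan (a + x) l).length := by
        simpa [pvScan] using h
      show ((a + x) :: pvScan (a + x) l)[k+1] = _
      simp only [List.getElem_cons_succ]
      rw [ih (a + x) k h', List.take_succ_cons, List.sum_cons]
      ring

lemma pvScan_getD (a : Int) (l : List Int) (k : Nat) (h : k < l.length) :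
    (a :: pvScan a l).getD (k+1) 0 = a + (l.take (k+1)).sum := by
  have h' : k < (pvScan a l).length := by rw [pvScan_length]; exact h
  rw [List.getD_cons_succ, List.getD_eq_getElem _ _ h', pvScan_get l a k h']

lemma pvSb (device : List String) (k : Nat) (hk : k ≤ device.length) :
    ((device.map pvDelta).take k).sum = pvS device k := by
  induction k with
  | zero => simp [pvS]
  | succ k ih =>
    have hk' : k < device.length := by omega
    have hk'' : k < (device.map pvDelta).length := by simpa using hk'
    rw [List.sum_take_succ _ _ hk'', ih (by omega),
        show pvS device (k+1) = pvS device k + pvDelta (device.getD (k % device.length) "") from rfl,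
        Nat.mod_eq_of_lt hk', List.getElem_map, List.getD_eq_getElem _ _ hk']

lemma pvPS (device : List String) (r : Nat) (hr : r ≤ device.length) :
    ((pvScan 0 (device.map pvDelta)).take r).sum = pvT device r := by
  induction r with
  | zero => simp [pvT]
  | succ r ih =>
    have hr' : r < (pvScan 0 (device.map pvDelta)).length := by
      rw [pvScan_length]; simpa using hr
    rw [List.sum_take_succ _ _ hr', ih (by omega), pvScan_get _ _ _ hr',
        show pvT device (r+1) = pvT device r + pvS device (r+1) from rfl,
        show ((device.map pvDelta).take (r+1)).sum = pvS device (r+1) from pvSb device (r+1) hr]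
    ring

lemma pvGauss (Q : Nat) :
    PySem.Int.floordiv ((Q : Int) * ((Q : Int) - 1)) 2 = pvG Q := by
  have h : pvG Q * 2 = (Q : Int) * ((Q : Int) - 1) := by
    induction Q with
    | zero => simp [pvG]
    | succ q ih =>
      rw [pvG, Finset.sum_range_succ, ← pvG]
      push_cast
      linear_combination ih
  rw [← h, PySem.Int.floordiv_eq_iff_of_pos (by omega : (0:Int) < 2)]
  omega

-- ===== VERDICT =====
theorem device_power_spec : Claim_equal_device_power := by
  intro device T _hdom hpre
  unfold Spec_device_power device_power device_power_alt
  by_cases hT : T ≤ 0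
  · rw [PySem.List.pyRange_one_eq_nil hT, if_pos hT]; rfl
  · have hdev : device ≠ [] := hpre.resolve_right hT
    have hn : 0 < device.length := List.length_pos_iff.mpr hdev
    rw [if_neg hT]
    set n := device.length with hn_def
    have hTn : ((T.toNat : Nat) : Int) = T := Int.toNat_of_nonneg (by omega)
    set Tn := T.toNat with hTn_def
    -- A's side
    rw [← hTn, pvA_loop]
    -- B's side: the two scans
    have hpref : device.foldl
        (fun (acc : List Int) s =>
          let d : Int := if s = "+" then 1 else if s = "-" then -1 else 0
          acc ++ [PySem.List.pyGetD acc (-1) 0 + d]) [0]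
        = 0 :: pvScan 0 (device.map pvDelta) := by
      have := pvScan_fold (device.map pvDelta) [] 0
      simp only [List.nil_append] at this
      rw [← this, List.foldl_map]
      rfl
    rw [hpref]
    simp only [List.drop_succ_cons, List.drop_zero]
    have hpsum := pvScan_fold (pvScan 0 (device.map pvDelta)) [] 0
    simp only [List.nil_append] at hpsum
    rw [hpsum]
    -- index computations
    have hlen : (device.map pvDelta).length = n := by simp [hn_def]
    have hlen2 : (pvScan 0 (device.map pvDelta)).length = n := by rw [pvScan_length, hlen]
    have hcycle : PySem.List.pyGetD (0 :: pvScan 0 (device.map pvDelta)) (n : Int) 0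
        = pvS device n := by
      rcases Nat.exists_eq_add_of_lt hn with ⟨k, hk⟩
      rw [PySem.List.pyGetD_natCast]
      rcases n with _ | m
      · omega
      · rw [pvScan_getD 0 (device.map pvDelta) m (by omega), pvSb device (m+1) (by omega)]
        ring
    have hpsumAt : ∀ (k : Nat), k ≤ n →
        PySem.List.pyGetD (0 :: pvScan 0 (pvScan 0 (device.map pvDelta))) (k : Int) 0
          = pvT device k := by
      intro k hk
      rw [PySem.List.pyGetD_natCast]
      rcases k with _ | m
      · simp [pvT]
      · rw [pvScan_getD 0 (pvScan 0 (device.map pvDelta)) m (by omega),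
            show ((pvScan 0 (device.map pvDelta)).take (m+1)).sum = pvT device (m+1) from
              pvPS device (m+1) hk]
        ring
    -- the quotient and remainder
    rw [PySem.Int.floordiv_natCast, PySem.Int.mod_natCast]
    set Q := Tn / n with hQ
    set R := Tn % n with hR
    rw [pvGauss, hcycle, hpsumAt n (le_refl n), hpsumAt R (le_of_lt (Nat.mod_lt _ hn))]
    -- closed form
    rw [show Tn = Q * n + R by rw [hQ, hR, Nat.mul_comm]; exact (Nat.div_add_mod Tn n).symm, pvMain]
    push_cast
    ring
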